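-- pv_equiv track=rewrite | github.com/PLeVasseur/iso-26262-rust-mapping | tools/traceability/mining/quality_metrics.py | _lineage_maps
-- ===== SOURCE A (Python) =====
-- from typing import Any
--
-- def _lineage_maps(
--     anchored_rows: list[dict[str, Any]],
-- ) -> tuple[int, int, int, int, int, int]:
--     section_ok = 0
--     section_total = 0
--     clause_ok = 0
--     clause_total = 0
--     table_ok = 0
--     table_total = 0
--
--     for row in anchored_rows:
--         scope_anchors = row.get("scope_anchors", {}) if isinstance(row, dict) else {}
--         locator = row.get("source_locator", {}) if isinstance(row, dict) else {}
--         if str(locator.get("section", "")):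
--             section_total += 1
--             if str(scope_anchors.get("section", "")):
--                 section_ok += 1
--         if str(locator.get("clause", "")):
--             clause_total += 1
--             if str(scope_anchors.get("clause", "")):
--                 clause_ok += 1
--         if str(locator.get("table", "")):
--             table_total += 1
--             if str(scope_anchors.get("table", "")):
--                 table_ok += 1
--
--     return section_ok, section_total, clause_ok, clause_total, table_ok, table_total
-- ===== SOURCE B (Python) =====
-- def _lineage_maps(anchored_rows):
--     pairs = [
--         (row.get("source_locator", {}), row.get("scope_anchors", {}))
--         for row in anchored_rows
--         if isinstance(row, dict)
--     ]
--
--     def count(field):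
--         total = sum(1 for loc, _ in pairs if str(loc.get(field, "")))
--         ok = sum(
--             1
--             for loc, anc in pairs
--             if str(loc.get(field, "")) and str(anc.get(field, ""))
--         )
--         return ok, total
--
--     s_ok, s_total = count("section")
--     c_ok, c_total = count("clause")
--     t_ok, t_total = count("table")
--     return s_ok, s_total, c_ok, c_total, t_ok, t_total
-- ===== Notes on version B (the rewrite author's own statement) =====
-- stated objective: idiomatic
-- what changed: Replaces the single loop with six unrolled counters by one pre-extraction of (locator, anchors) pairs plus a per-field count helper computed with generator-expression sums, one pass per field.
import Mathlib
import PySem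

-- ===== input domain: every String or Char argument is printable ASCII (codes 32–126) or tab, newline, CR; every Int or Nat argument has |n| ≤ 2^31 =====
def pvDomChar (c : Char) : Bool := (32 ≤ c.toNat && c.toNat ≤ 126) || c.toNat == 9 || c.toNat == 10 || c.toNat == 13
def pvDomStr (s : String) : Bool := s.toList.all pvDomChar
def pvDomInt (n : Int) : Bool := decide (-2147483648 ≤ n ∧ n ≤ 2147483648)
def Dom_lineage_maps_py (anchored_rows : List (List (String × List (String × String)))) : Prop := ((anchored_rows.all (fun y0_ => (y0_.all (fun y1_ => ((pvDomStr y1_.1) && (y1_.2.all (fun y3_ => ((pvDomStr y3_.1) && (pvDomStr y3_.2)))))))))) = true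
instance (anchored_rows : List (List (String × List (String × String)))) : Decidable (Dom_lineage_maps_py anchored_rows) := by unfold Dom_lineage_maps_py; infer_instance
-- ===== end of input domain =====

-- B replaces A's single loop carrying six unrolled counters by a pre-extracted pair list and a
-- per-field counting helper (one filtering pass per field); same O(n) cost, more idiomatic.

-- dict.get(k, default): first-match lookup on the association list (the dict convention)
def pvGetD {α : Type} (d : List (String × α)) (k : String) (dflt : α) : α :=
  match d with
  | [] => dflt
  | (k', v) :: rest => if k' == k then v else pvGetD rest k dflt

-- ===== PORT A =====
-- A's for-loop over rows, threading the six counters; branches in source order.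
-- (isinstance(row, dict) is always true under the type convention, so the else-{} arms are dead.)
def pvLoopA : List (List (String × List (String × String))) →
    Int × Int × Int × Int × Int × Int → Int × Int × Int × Int × Int × Int
  | [], st => st
  | row :: rest, (so, stot, co, ct, tok, tt) =>
    let sa := pvGetD row "scope_anchors" []
    let loc := pvGetD row "source_locator" []
    let (so, stot) :=
      if pvGetD loc "section" "" ≠ "" then
        (if pvGetD sa "section" "" ≠ "" then so + 1 else so, stot + 1)
      else (so, stot)
    let (co, ct) :=
      if pvGetD loc "clause" "" ≠ "" then
        (if pvGetD sa "clause" "" ≠ "" then co + 1 else co, ct + 1)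
      else (co, ct)
    let (tok, tt) :=
      if pvGetD loc "table" "" ≠ "" then
        (if pvGetD sa "table" "" ≠ "" then tok + 1 else tok, tt + 1)
      else (tok, tt)
    pvLoopA rest (so, stot, co, ct, tok, tt)

def lineage_maps_py (anchored_rows : List (List (String × List (String × String)))) : Int × Int × Int × Int × Int × Int :=
  pvLoopA anchored_rows (0, 0, 0, 0, 0, 0)

-- ===== PORT B =====
def pvPairs (anchored_rows : List (List (String × List (String × String)))) :
    List (List (String × String) × List (String × String)) :=
  anchored_rows.map (fun row =>
    (pvGetD row "source_locator" [], pvGetD row "scope_anchors" []))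

-- count(field): (ok, total), each a sum over the pair list
def pvCount (pairs : List (List (String × String) × List (String × String))) (field : String) : Int × Int :=
  let total : Int := (pairs.filter (fun p => pvGetD p.1 field "" ≠ "")).length
  let ok : Int := (pairs.filter
      (fun p => pvGetD p.1 field "" ≠ "" ∧ pvGetD p.2 field "" ≠ "")).length
  (ok, total)

def lineage_maps_py_alt (anchored_rows : List (List (String × List (String × String)))) : Int × Int × Int × Int × Int × Int :=
  let pairs := pvPairs anchored_rows
  let s := pvCount pairs "section"
  let c := pvCount pairs "clause"
  let t := pvCount pairs "table"
  (s.1, s.2, c.1, c.2, t.1, t.2)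

-- ===== PRECONDITION & SPEC =====
def Spec_lineage_maps_py (anchored_rows : List (List (String × List (String × String)))) (out : Int × Int × Int × Int × Int × Int) : Prop := out = lineage_maps_py_alt anchored_rows
instance (anchored_rows : List (List (String × List (String × String)))) (out : Int × Int × Int × Int × Int × Int) : Decidable (Spec_lineage_maps_py anchored_rows out) := by unfold Spec_lineage_maps_py; infer_instance

-- ===== CLAIM (what is proved, stated in full; the proofs are below) =====
def Claim_equal_lineage_maps_py : Prop := ∀ (anchored_rows : List (List (String × List (String × String)))), Dom_lineage_maps_py anchored_rows → Spec_lineage_maps_py anchored_rows (lineage_maps_py anchored_rows)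

-- ===== LEMMAS AND PROOFS =====

theorem pvLoopA_eq (rows : List (List (String × List (String × String))))
    (so stot co ct tok tt : Int) :
    pvLoopA rows (so, stot, co, ct, tok, tt) =
      (so + (pvCount (pvPairs rows) "section").1,
       stot + (pvCount (pvPairs rows) "section").2,
       co + (pvCount (pvPairs rows) "clause").1,
       ct + (pvCount (pvPairs rows) "clause").2,
       tok + (pvCount (pvPairs rows) "table").1,
       tt + (pvCount (pvPairs rows) "table").2) := by
  induction rows generalizing so stot co ct tok tt with
  | nil => simp [pvLoopA, pvPairs, pvCount]
  | cons row rest ih =>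
    simp only [pvLoopA]
    split_ifs <;>
    · rw [ih]
      simp only [pvPairs, List.map_cons, pvCount, List.filter_cons, Prod.mk.injEq]
      refine ⟨?_, ?_, ?_, ?_, ?_, ?_⟩ <;>
      · simp_all only [ne_eq, decide_true, decide_false, not_false_eq_true,
          and_false, false_and, and_self, decide_not, if_true, List.length_cons]
        push_cast
        omega

theorem lineage_maps_py_spec' (anchored_rows : List (List (String × List (String × String)))) :
    lineage_maps_py anchored_rows = lineage_maps_py_alt anchored_rows := by
  simp [lineage_maps_py, lineage_maps_py_alt, pvLoopA_eq]

-- ===== VERDICT (by name: the statement is the Claim_ definition above) =====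
theorem lineage_maps_py_spec : Claim_equal_lineage_maps_py := by
  intro rows _
  exact lineage_maps_py_spec' rows
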